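-- pv_equiv track=rewrite | github.com/rickhallett/thepit | pitkeel/git_io.py | find_last_sd
-- ===== SOURCE A (Python) =====
-- def find_last_sd(content: str) -> str:
--     """Extract last SD-NNN from session-decisions.md content."""
--     last_sd = ""
--     for line in content.split("\n"):
--         trimmed = line.strip()
--         if not trimmed.startswith("| SD-"):
--             continue
--         # Extract "SD-NNN" from "| SD-228 | ..."
--         rest = trimmed[2:]  # skip "| "
--         idx = rest.find(" ")
--         if idx > 0:
--             candidate = rest[:idx]
--             if candidate.startswith("SD-"):
--                 last_sd = candidate
--     return last_sd
-- ===== SOURCE B (Python) =====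
-- def find_last_sd(content: str) -> str:
--     """Extract last SD-NNN from session-decisions.md content."""
--     for line in reversed(content.split("\n")):
--         trimmed = line.strip()
--         if not trimmed.startswith("| SD-"):
--             continue
--         rest = trimmed[2:]
--         idx = rest.find(" ")
--         if idx > 0:
--             candidate = rest[:idx]
--             if candidate.startswith("SD-"):
--                 return candidate
--     return ""
-- ===== Notes on version B (the rewrite author's own statement) =====
-- stated objective: alternative
-- what changed: Backward scan over reversed(lines) returning the first valid SD- candidate immediately, instead of a forward pass overwriting an accumulator.
import Mathlib
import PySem

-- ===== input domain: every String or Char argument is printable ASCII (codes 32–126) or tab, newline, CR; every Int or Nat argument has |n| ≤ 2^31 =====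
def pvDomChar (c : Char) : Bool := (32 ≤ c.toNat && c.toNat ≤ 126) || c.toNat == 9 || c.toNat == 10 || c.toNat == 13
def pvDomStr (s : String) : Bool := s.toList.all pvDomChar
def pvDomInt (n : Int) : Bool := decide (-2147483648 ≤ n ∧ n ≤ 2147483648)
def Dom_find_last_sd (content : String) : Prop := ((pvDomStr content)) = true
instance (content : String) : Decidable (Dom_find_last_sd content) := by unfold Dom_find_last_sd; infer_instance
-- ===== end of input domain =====

-- B replaces A's forward accumulator-overwriting pass with a backward scan over the
-- reversed lines that returns the first valid SD- candidate (i.e. the last in the file).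


-- ===== PORT A =====
def find_last_sd (content : String) : String :=
  ((PySem.Str.split? content "\n").getD []).foldl
    (fun last_sd line =>
      let trimmed := PySem.Str.strip line
      if !(PySem.Str.startswith trimmed "| SD-") then last_sd
      else
        let rest := PySem.Str.slice trimmed (some 2) none
        let idx := PySem.Str.find rest " "
        if idx > 0 then
          let candidate := PySem.Str.slice rest none (some idx)
          if PySem.Str.startswith candidate "SD-" then candidate else last_sd
        else last_sd)
    ""

-- ===== PORT B =====
def find_last_sd_alt_loop : List String → String
  | [] => ""
  | line :: rest_lines =>
    let trimmed := PySem.Str.strip line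
    if !(PySem.Str.startswith trimmed "| SD-") then find_last_sd_alt_loop rest_lines
    else
      let rest := PySem.Str.slice trimmed (some 2) none
      let idx := PySem.Str.find rest " "
      if idx > 0 then
        let candidate := PySem.Str.slice rest none (some idx)
        if PySem.Str.startswith candidate "SD-" then candidate
        else find_last_sd_alt_loop rest_lines
      else find_last_sd_alt_loop rest_lines

def find_last_sd_alt (content : String) : String :=
  find_last_sd_alt_loop (((PySem.Str.split? content "\n").getD []).reverse)

-- ===== PRECONDITION & SPEC =====
def Spec_find_last_sd (content : String) (out : String) : Prop := out = find_last_sd_alt content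
instance (content : String) (out : String) : Decidable (Spec_find_last_sd content out) := by unfold Spec_find_last_sd; infer_instance

-- ===== CLAIM (what is proved, stated in full; the proofs are below) =====
def Claim_equal_find_last_sd : Prop := ∀ (content : String), Dom_find_last_sd content → Spec_find_last_sd content (find_last_sd content)

-- ===== LEMMAS AND PROOFS =====

/-- Per-line extraction: `some candidate` iff the line yields a new value. -/
def pvStep (line : String) : Option String :=
  let trimmed := PySem.Str.strip line
  if !(PySem.Str.startswith trimmed "| SD-") then none
  else
    let rest := PySem.Str.slice trimmed (some 2) none
    let idx := PySem.Str.find rest " "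
    if idx > 0 then
      let candidate := PySem.Str.slice rest none (some idx)
      if PySem.Str.startswith candidate "SD-" then some candidate else none
    else none

theorem pvLoop_eq (l : List String) :
    find_last_sd_alt_loop l = (l.findSome? pvStep).getD "" := by
  induction l with
  | nil => rfl
  | cons x xs ih =>
    simp only [find_last_sd_alt_loop, List.findSome?, pvStep]
    split_ifs <;> simp [ih]

theorem pvFoldl_eq (l : List String) (acc : String) :
    l.foldl
      (fun last_sd line =>
        let trimmed := PySem.Str.strip line
        if !(PySem.Str.startswith trimmed "| SD-") then last_sd
        else
          let rest := PySem.Str.slice trimmed (some 2) none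
          let idx := PySem.Str.find rest " "
          if idx > 0 then
            let candidate := PySem.Str.slice rest none (some idx)
            if PySem.Str.startswith candidate "SD-" then candidate else last_sd
          else last_sd) acc
    = (l.reverse.findSome? pvStep).getD acc := by
  induction l generalizing acc with
  | nil => rfl
  | cons x xs ih =>
    simp only [List.foldl, List.reverse_cons, List.findSome?_append, ih]
    cases h : xs.reverse.findSome? pvStep with
    | some c => simp
    | none =>
      simp only [Option.none_or]
      simp only [List.findSome?, pvStep]
      split_ifs <;> simp

-- ===== VERDICT (by name: the statement is the Claim_ definition above) =====
theorem find_last_sd_spec : Claim_equal_find_last_sd := by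
  intro content _
  unfold Spec_find_last_sd find_last_sd find_last_sd_alt
  rw [pvFoldl_eq, pvLoop_eq]
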